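-- pv_equiv track=rewrite | github.com/sangho-vision/acav100m | correspondence_retrieval/code/cluster_pairing.py | get_single_layer
-- ===== SOURCE A (Python) =====
-- from collections import defaultdict
--
-- def get_single_layer(keys, layer=-1):
--     # get aligned single layer features (before classification linear projection)
--     keys = {v: i for i, v in enumerate(keys)}
--     clustering_names = defaultdict(list)
--     for key, idx in keys.items():
--         view = key[:key.find('_')]  # get dataset+model name
--         clustering_name = key[key.find('_') + 1:]
--         clustering_names[clustering_name].append(idx)
--     key = sorted(list(clustering_names.keys()))[layer]
--     pairs = [clustering_names[key]]
--     return pairs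
-- ===== SOURCE B (Python) =====
-- def get_single_layer(keys, layer=-1):
--     # get aligned single layer features (before classification linear projection)
--     keys = {v: i for i, v in enumerate(keys)}
--     names = sorted({k[k.find('_') + 1:] for k in keys})
--     target = names[layer]
--     return [[i for k, i in keys.items() if k[k.find('_') + 1:] == target]]
-- ===== Notes on version B (the rewrite author's own statement) =====
-- stated objective: simpler
-- what changed: Instead of building the full suffix-to-indices grouping table and then picking one bucket, B computes the sorted set of distinct suffixes, selects the requested one, and collects its indices in a single filtering pass.
import Mathlib
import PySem

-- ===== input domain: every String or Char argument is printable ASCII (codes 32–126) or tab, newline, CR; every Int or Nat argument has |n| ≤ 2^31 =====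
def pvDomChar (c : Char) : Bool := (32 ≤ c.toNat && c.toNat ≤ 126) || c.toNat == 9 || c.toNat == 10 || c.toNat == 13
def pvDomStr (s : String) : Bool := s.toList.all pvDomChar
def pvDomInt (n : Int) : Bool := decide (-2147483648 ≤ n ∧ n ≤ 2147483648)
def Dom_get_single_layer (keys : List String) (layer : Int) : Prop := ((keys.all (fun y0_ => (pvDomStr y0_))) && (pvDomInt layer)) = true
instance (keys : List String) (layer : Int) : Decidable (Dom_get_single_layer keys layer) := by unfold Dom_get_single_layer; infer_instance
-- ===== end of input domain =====

-- B replaces A's full suffix→indices grouping table by picking the sorted distinct suffix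
-- directly and doing one filtering pass for the chosen suffix only (objective: simpler).

-- key[key.find('_') + 1:]  (shared helper: the same expression occurs in both Pythons)
def pvSuffix (s : String) : String :=
  PySem.Str.slice s (some (PySem.Str.find s "_" + 1)) none

-- keys = {v: i for i, v in enumerate(keys)}  (identical first line of both Pythons)
def pvDedupDict (keys : List String) : PySem.Dict String Int :=
  (PySem.List.enumerate keys).foldl (fun d p => d.insert p.2 p.1) PySem.Dict.empty

-- ===== PORT A =====
def get_single_layer (keys : List String) (layer : Int) : List (List Int) :=
  let d := pvDedupDict keys
  let cn : PySem.Dict String (List Int) :=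
    d.items.foldl (fun cn p => cn.modify (pvSuffix p.1) ([] : List Int) (· ++ [p.2]))
      PySem.Dict.empty
  match PySem.List.pyGet? (PySem.List.sorted cn.keys (fun x => x) false) layer with
  | none => []          -- IndexError in Python; excluded by Pre_
  | some key => [cn.getD key []]

-- ===== PORT B =====
def get_single_layer_alt (keys : List String) (layer : Int) : List (List Int) :=
  let d := pvDedupDict keys
  let names := PySem.List.sorted (PySem.Set.ofList (d.keys.map pvSuffix)) (fun x => x) false
  match PySem.List.pyGet? names layer with
  | none => []          -- IndexError in Python; excluded by Pre_
  | some target => [(d.items.filter (fun p => pvSuffix p.1 == target)).map (·.2)]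

-- ===== PRECONDITION & SPEC =====
-- Pre_ excludes exactly the inputs on which Python A raises IndexError: layer out of
-- range for the list of distinct suffixes of the deduplicated keys (e.g. any empty keys).
def Pre_get_single_layer (keys : List String) (layer : Int) : Prop :=
  PySem.Raise.InRange (PySem.Set.ofList ((PySem.List.dedup keys).map pvSuffix)).length layer
instance (keys : List String) (layer : Int) : Decidable (Pre_get_single_layer keys layer) := by
  unfold Pre_get_single_layer; infer_instance

def pvWitness_get_single_layer : List String × Int := (["v1_l1", "v2_l1", "v1_l2"], -1)

def Spec_get_single_layer (keys : List String) (layer : Int) (out : List (List Int)) : Prop := out = get_single_layer_alt keys layer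
instance (keys : List String) (layer : Int) (out : List (List Int)) : Decidable (Spec_get_single_layer keys layer out) := by unfold Spec_get_single_layer; infer_instance

-- ===== CLAIM (what is proved, stated in full; the proofs are below) =====
def Claim_equal_get_single_layer : Prop := ∀ (keys : List String) (layer : Int), Dom_get_single_layer keys layer → Pre_get_single_layer keys layer → Spec_get_single_layer keys layer (get_single_layer keys layer)

-- ===== LEMMAS AND PROOFS =====

-- A's grouping dict, pushed through List.foldl_map so the PySem grouping lemmas apply.
theorem pvGroup_eq (l : List (String × Int)) :
    l.foldl (fun cn p => cn.modify (pvSuffix p.1) ([] : List Int) (· ++ [p.2])) PySem.Dict.empty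
      = (l.map (fun p => (pvSuffix p.1, p.2))).foldl
          (fun cn p => cn.modify p.1 ([] : List Int) (· ++ [p.2])) PySem.Dict.empty := by
  rw [List.foldl_map]

theorem get_single_layer_spec : Claim_equal_get_single_layer := by
  intro keys layer _ _
  unfold Spec_get_single_layer get_single_layer get_single_layer_alt
  simp only [pvGroup_eq]
  have hkeys :
      ((((pvDedupDict keys).items.map (fun p => (pvSuffix p.1, p.2))).foldl
          (fun cn p => cn.modify p.1 ([] : List Int) (· ++ [p.2])) PySem.Dict.empty)).keys
        = PySem.Set.ofList ((pvDedupDict keys).keys.map pvSuffix) := by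
    rw [PySem.Dict.keys_foldl_modify_key (key := Prod.fst) (f := fun _ p => (· ++ [p.2]))]
    simp [PySem.Set.update, PySem.Set.ofList_eq_foldl, PySem.Dict.keys, List.map_map,
      Function.comp_def, PySem.Dict.empty]
  rw [hkeys]
  cases hg : PySem.List.pyGet?
      (PySem.List.sorted (PySem.Set.ofList ((pvDedupDict keys).keys.map pvSuffix)) (fun x => x) false) layer with
  | none => rfl
  | some key =>
    simp [PySem.Dict.getD_foldl_modify_append, List.filter_map, List.map_map,
      Function.comp_def, PySem.Dict.getD_empty]

-- ===== VERDICT (by name: the statement is the Claim_ definition above) =====
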